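-- pv_equiv track=rewrite | github.com/haileylwb/Research | main.py | matchSample
-- ===== SOURCE A (Python) =====
-- def matchSample(sequences, sample):
--     matchedSeq = []
--     indexList = [item['index'] for item in sample]
--     for sequence in sequences:
--         match = True
--         for i in range(len(indexList)):
--             if sequence[indexList[i]] != sample[i]["value"]:
--                 match = False
--                 break
--         if match:
--             matchedSeq.append(sequence)
--     return matchedSeq
-- ===== SOURCE B (Python) =====
-- def matchSample(sequences, sample):
--     working = sequences
--     for item in sample:
--         idx = item['index']
--         val = item['value']
--         working = [seq for seq in working if seq[idx] == val]
--     return working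
-- ===== Notes on version B (the rewrite author's own statement) =====
-- stated objective: idiomatic
-- what changed: B interchanges the loops: instead of testing each sequence against all constraints with an inner break, it maintains a shrinking working list of candidate sequences and successively filters it by each constraint of sample, which is the idiomatic successive-refinement formulation.
-- outside the precondition, e.g. on matchSample([[1]], [{'index': 0, 'value': 5}, {'index': 3, 'value': 0}]): A returns [], B returns []; on matchSample([], [{'index': 0}]): A returns [], B raises KeyError
import Mathlib
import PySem

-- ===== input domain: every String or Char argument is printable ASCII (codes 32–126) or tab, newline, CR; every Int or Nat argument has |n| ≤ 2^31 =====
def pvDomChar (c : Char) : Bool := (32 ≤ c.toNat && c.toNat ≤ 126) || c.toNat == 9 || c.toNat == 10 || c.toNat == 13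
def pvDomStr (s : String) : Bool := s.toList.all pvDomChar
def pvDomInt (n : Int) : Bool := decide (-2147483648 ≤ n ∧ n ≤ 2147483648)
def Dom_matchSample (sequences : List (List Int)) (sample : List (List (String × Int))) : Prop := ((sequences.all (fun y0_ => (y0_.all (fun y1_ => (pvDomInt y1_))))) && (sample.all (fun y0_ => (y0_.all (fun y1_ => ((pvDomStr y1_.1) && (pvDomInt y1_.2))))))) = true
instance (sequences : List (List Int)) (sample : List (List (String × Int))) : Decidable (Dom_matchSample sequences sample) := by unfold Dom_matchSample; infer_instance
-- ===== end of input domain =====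

-- B maintains a shrinking candidate list filtered constraint by constraint instead of
-- A's sequence-outer nested loop with break; return values agree on Pre_ (idiomatic rewrite, not faster).

-- shared helper: Python dict lookup item[k] (total form; exact under Pre_, which requires the key present)
def pvItemD (item : List (String × Int)) (k : String) : Int :=
  (PySem.Dict.mk item).getD k 0

-- ===== PORT A =====
-- the inner 'for i in range(len(indexList)): … break' as structural recursion over indexList zipped with sample
def pvACheck (sequence : List Int) : List (Int × List (String × Int)) → Bool
  | [] => true
  | (idx, item) :: rest =>
    if PySem.List.pyGetD sequence idx 0 ≠ pvItemD item "value" then false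
    else pvACheck sequence rest

def matchSample (sequences : List (List Int)) (sample : List (List (String × Int))) : List (List Int) :=
  let indexList := sample.map (fun item => pvItemD item "index")
  sequences.foldl (fun matchedSeq sequence =>
    if pvACheck sequence (indexList.zip sample) then matchedSeq ++ [sequence] else matchedSeq) []

-- ===== PORT B =====
def matchSample_alt (sequences : List (List Int)) (sample : List (List (String × Int))) : List (List Int) :=
  sample.foldl (fun working item =>
    working.filter (fun seq => PySem.List.pyGetD seq (pvItemD item "index") 0 == pvItemD item "value")) sequences

-- ===== PRECONDITION & SPEC =====
-- Pre_ excludes inputs where either Python raises (KeyError on a missing 'index'/'value' key, IndexError on an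
-- out-of-range index); it is slightly narrower than A's exact returning domain: A can still return when its inner
-- break skips a later out-of-range index or an unreached missing 'value' key — those accidental returns are excluded too.
def Pre_matchSample (sequences : List (List Int)) (sample : List (List (String × Int))) : Prop :=
  (∀ item ∈ sample, "index" ∈ item.map Prod.fst ∧ "value" ∈ item.map Prod.fst) ∧
  (∀ s ∈ sequences, ∀ item ∈ sample, PySem.Raise.InRange s.length (pvItemD item "index"))
instance (sequences : List (List Int)) (sample : List (List (String × Int))) : Decidable (Pre_matchSample sequences sample) := by unfold Pre_matchSample; infer_instance

def pvWitness_matchSample : List (List Int) × (List (List (String × Int))) :=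
  ([[1, 2], [3, 4], [1, 5]], [[("index", 0), ("value", 1)], [("index", -1), ("value", 5)]])

def Spec_matchSample (sequences : List (List Int)) (sample : List (List (String × Int))) (out : List (List Int)) : Prop := out = matchSample_alt sequences sample
instance (sequences : List (List Int)) (sample : List (List (String × Int))) (out : List (List Int)) : Decidable (Spec_matchSample sequences sample out) := by unfold Spec_matchSample; infer_instance

-- ===== CLAIM (what is proved, stated in full; the proofs are below) =====
def Claim_equal_matchSample : Prop := ∀ (sequences : List (List Int)) (sample : List (List (String × Int))), Dom_matchSample sequences sample → Pre_matchSample sequences sample → Spec_matchSample sequences sample (matchSample sequences sample)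

-- ===== LEMMAS AND PROOFS =====

-- A's append-accumulator loop is a filter by the inner check
theorem pvA_eq_filter (sequences : List (List Int)) (sample : List (List (String × Int))) :
    matchSample sequences sample
      = sequences.filter (fun s => pvACheck s ((sample.map (fun item => pvItemD item "index")).zip sample)) := by
  simpa [matchSample] using
    PySem.List.foldl_append_if
      (fun s => pvACheck s ((sample.map (fun item => pvItemD item "index")).zip sample)) id sequences []

theorem pv_zip_map (sample : List (List (String × Int))) :
    (sample.map (fun item => pvItemD item "index")).zip sample
      = sample.map (fun item => (pvItemD item "index", item)) := by
  induction sample with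
  | nil => rfl
  | cons it rest ih => simp [ih]

-- core: successive filtering equals one filter by the conjoined check
theorem pv_refine_eq_filter (sample : List (List (String × Int))) (ws : List (List Int)) :
    sample.foldl (fun working item =>
        working.filter (fun seq => PySem.List.pyGetD seq (pvItemD item "index") 0 == pvItemD item "value")) ws
      = ws.filter (fun s => pvACheck s (sample.map (fun item => (pvItemD item "index", item)))) := by
  induction sample generalizing ws with
  | nil => simp [pvACheck]
  | cons it rest ih =>
    rw [List.foldl_cons, ih, List.filter_filter]
    apply List.filter_congr
    intro s _
    by_cases h : PySem.List.pyGetD s (pvItemD it "index") 0 = pvItemD it "value" <;>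
      simp [pvACheck, h]

-- ===== VERDICT (by name: the statement is the Claim_ definition above) =====
theorem matchSample_spec : Claim_equal_matchSample := by
  intro sequences sample _ _
  unfold Spec_matchSample matchSample_alt
  rw [pv_refine_eq_filter, ← pv_zip_map, ← pvA_eq_filter]
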